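-- pv_equiv track=rewrite | github.com/futurepaycc/automata_practise1 | regexp/naive_test/regexp2.py | expr1
-- ===== SOURCE A (Python) =====
-- from typing import List
--
-- LANG_LETTER = ['a','b','c']
--
-- RE_LETTER = ['+','*','|']
--
-- def expr1(pattern_str):
--     letters:List = list(pattern_str)
--     # while ( cur=letters.pop() ) != None: #py3.8才支持赋值表达式: https://stackoverflow.com/questions/6631128/assign-variable-in-while-loop-condition-in-python
--
--     res_patten_l:List = []
--
--     cur_re_letter = None
--     cur_lang_letter = None
--     for letter in reversed(letters) : # 用栈的思路, 先处理结尾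
--
--         if letter in RE_LETTER:
--             cur_re_letter = letter
--             continue
--         elif letter in LANG_LETTER:
--             cur_lang_letter = letter
--         else:
--             raise Exception("不认识的字母")
--
--         if cur_lang_letter:
--             if cur_re_letter:
--                 res_patten_l.append( (cur_lang_letter,cur_re_letter) )
--             else:
--                 res_patten_l.append( (cur_lang_letter,None) )
--     return list( reversed(res_patten_l) )
-- ===== SOURCE B (Python) =====
-- LANG_LETTER = ['a','b','c']
--
-- RE_LETTER = ['+','*','|']
--
-- def expr1(pattern_str):
--     # Forward scan: buffer pending language letters; each operator flushes the
--     # buffer (every buffered letter pairs with the nearest operator to its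
--     # right); leftovers at the end pair with None.
--     res = []
--     buf = []
--     for ch in pattern_str:
--         if ch in LANG_LETTER:
--             buf.append(ch)
--         elif ch in RE_LETTER:
--             for l in buf:
--                 res.append((l, ch))
--             buf = []
--         else:
--             raise Exception("不认识的字母")
--     for l in buf:
--         res.append((l, None))
--     return res
-- ===== Notes on version B (the rewrite author's own statement) =====
-- stated objective: alternative
-- what changed: B scans the pattern forward with a buffer of pending letters flushed at each operator, instead of A's reversed-scan carrying the last-seen operator and a final list reversal.
import Mathlib
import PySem

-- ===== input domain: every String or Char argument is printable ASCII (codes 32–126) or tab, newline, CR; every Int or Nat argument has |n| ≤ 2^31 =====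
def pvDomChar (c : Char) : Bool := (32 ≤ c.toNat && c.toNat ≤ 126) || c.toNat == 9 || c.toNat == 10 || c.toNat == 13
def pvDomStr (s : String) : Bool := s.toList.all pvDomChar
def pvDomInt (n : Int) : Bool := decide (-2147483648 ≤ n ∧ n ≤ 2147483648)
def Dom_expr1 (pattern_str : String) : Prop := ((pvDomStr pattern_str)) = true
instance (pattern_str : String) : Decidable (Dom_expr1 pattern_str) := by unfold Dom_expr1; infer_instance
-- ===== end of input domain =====

-- B scans the pattern forward, buffering letters and flushing the buffer at each
-- operator, instead of A's reversed scan carrying the last-seen operator plus a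
-- final reversal; same cost, different decomposition.


-- ===== PORT A =====
def LANG_LETTER : List String := ["a", "b", "c"]

def RE_LETTER : List String := ["+", "*", "|"]

-- the for-loop of A over reversed(letters); state = (cur_re_letter, cur_lang_letter, res_patten_l);
-- 'none' = the Exception("不认识的字母") branch
def expr1Go : List String → Option String → Option String → List (String × Option String) →
    Option (List (String × Option String))
  | [], _, _, res => some res
  | letter :: rest, curRe, curLang, res =>
    if RE_LETTER.contains letter then
      expr1Go rest (some letter) curLang res
    else if LANG_LETTER.contains letter then
      -- cur_lang_letter = letter; then 'if cur_lang_letter:' (a just-set one-char string, truthy)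
      match (some letter : Option String) with
      | some l =>
        match curRe with
        | some r => expr1Go rest curRe (some letter) (res ++ [(l, some r)])
        | none => expr1Go rest curRe (some letter) (res ++ [(l, none)])
      | none => expr1Go rest curRe curLang res
    else none

def expr1 (pattern_str : String) : List (String × Option String) :=
  let letters : List String := pattern_str.toList.map (fun c => String.mk [c])
  ((expr1Go letters.reverse none none []).getD []).reverse

-- ===== PORT B =====
-- B's forward loop; state = (buf of pending letters, res); 'none' = the raise branch
def expr1AltGo : List String → List String → List (String × Option String) →
    Option (List (String × Option String))
  | [], buf, res => some (res ++ buf.map (fun l => (l, (none : Option String))))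
  | ch :: rest, buf, res =>
    if LANG_LETTER.contains ch then
      expr1AltGo rest (buf ++ [ch]) res
    else if RE_LETTER.contains ch then
      expr1AltGo rest [] (res ++ buf.map (fun l => (l, some ch)))
    else none

def expr1_alt (pattern_str : String) : List (String × Option String) :=
  (expr1AltGo (pattern_str.toList.map (fun c => String.mk [c])) [] []).getD []

-- ===== PRECONDITION & SPEC =====
-- Pre_ excludes exactly the strings containing a character that is neither a language
-- letter nor an operator letter, on which the Python A raises an Exception (and B
-- raises the same way).
def Pre_expr1 (pattern_str : String) : Prop :=
  (pattern_str.toList.all (fun c => ['a', 'b', 'c', '+', '*', '|'].contains c)) = true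
instance (pattern_str : String) : Decidable (Pre_expr1 pattern_str) := by
  unfold Pre_expr1; infer_instance

def pvWitness_expr1 : String := "ab+c*a"

def Spec_expr1 (pattern_str : String) (out : List (String × Option String)) : Prop := out = expr1_alt pattern_str
instance (pattern_str : String) (out : List (String × Option String)) : Decidable (Spec_expr1 pattern_str out) := by unfold Spec_expr1; infer_instance

-- ===== CLAIM (what is proved, stated in full; the proofs are below) =====
def Claim_equal_expr1 : Prop := ∀ (pattern_str : String), Dom_expr1 pattern_str → Pre_expr1 pattern_str → Spec_expr1 pattern_str (expr1 pattern_str)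

-- ===== LEMMAS AND PROOFS =====

-- first RE letter of the list (scanning forward), falling back to `cur`
def firstRE : List String → Option String → Option String
  | [], cur => cur
  | x :: rest, cur => if RE_LETTER.contains x then some x else firstRE rest cur

-- common specification: each non-RE letter paired with the nearest RE letter to its right
def specT : List String → Option String → List (String × Option String)
  | [], _ => []
  | x :: rest, cur =>
    if RE_LETTER.contains x then specT rest cur
    else (x, firstRE rest cur) :: specT rest cur

-- A's loop body viewed on the reversed list, without the accumulator
def specU : List String → Option String → List (String × Option String)
  | [], _ => []
  | y :: rest, cur =>
    if RE_LETTER.contains y then specU rest (some y)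
    else (y, cur) :: specU rest cur

theorem lang_not_re (l : String) (h : l ∈ LANG_LETTER) :
    l ∉ RE_LETTER := by
  simp [LANG_LETTER] at h
  rcases h with h | h | h <;> subst h <;> decide

theorem expr1Go_acc (xs : List String) (cr cl : Option String)
    (res : List (String × Option String)) :
    expr1Go xs cr cl res = (expr1Go xs cr cl []).map (res ++ ·) := by
  induction xs generalizing cr cl res with
  | nil => simp [expr1Go]
  | cons x rest ih =>
    simp only [expr1Go]
    by_cases hre : RE_LETTER.contains x = true
    · rw [if_pos hre, if_pos hre, ih (some x) cl res]
    · by_cases hl : LANG_LETTER.contains x = true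
      · cases cr with
        | none =>
          rw [if_neg hre, if_neg hre, if_pos hl, if_pos hl,
            ih none (some x) (res ++ [(x, none)]), ih none (some x) ([] ++ [(x, none)])]
          cases expr1Go rest none (some x) [] <;> simp
        | some r =>
          rw [if_neg hre, if_neg hre, if_pos hl, if_pos hl]
          show expr1Go rest (some r) (some x) (res ++ [(x, some r)]) =
            Option.map (fun t => res ++ t)
              (expr1Go rest (some r) (some x) ([] ++ [(x, some r)]))
          rw [ih (some r) (some x) (res ++ [(x, some r)]),
            ih (some r) (some x) ([] ++ [(x, some r)])]
          cases expr1Go rest (some r) (some x) [] <;> simp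
      · rw [if_neg hre, if_neg hre, if_neg hl, if_neg hl]
        simp

theorem expr1Go_eq_specU (xs : List String)
    (hv : ∀ l ∈ xs, l ∈ LANG_LETTER ∨ l ∈ RE_LETTER)
    (cr cl : Option String) :
    expr1Go xs cr cl [] = some (specU xs cr) := by
  induction xs generalizing cr cl with
  | nil => simp [expr1Go, specU]
  | cons x rest ih =>
    have hx := hv x (by simp)
    have hv' : ∀ l ∈ rest, l ∈ LANG_LETTER ∨ l ∈ RE_LETTER :=
      fun l hl => hv l (by simp [hl])
    by_cases hre : x ∈ RE_LETTER
    · simp [expr1Go, specU, hre, ih hv' (some x) cl]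
    · have hl : x ∈ LANG_LETTER := by tauto
      have hlc : LANG_LETTER.contains x = true := by simpa using hl
      have hrec : RE_LETTER.contains x = false := by simpa using hre
      cases cr with
      | none =>
        simp only [expr1Go, specU, hlc, hrec, Bool.false_eq_true, if_false, if_true]
        rw [expr1Go_acc, ih hv' none (some x)]
        simp
      | some r =>
        simp only [expr1Go, specU, hlc, hrec, Bool.false_eq_true, if_false, if_true]
        rw [expr1Go_acc, ih hv' (some r) (some x)]
        simp

theorem firstRE_append_re (zs : List String) (y : String) (cur : Option String)
    (h : y ∈ RE_LETTER) :
    firstRE (zs ++ [y]) cur = firstRE zs (some y) := by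
  induction zs with
  | nil => simp [firstRE, h]
  | cons z t ih => by_cases hz : z ∈ RE_LETTER <;> simp [firstRE, hz, ih]

theorem firstRE_append_not_re (zs : List String) (y : String) (cur : Option String)
    (h : y ∉ RE_LETTER) :
    firstRE (zs ++ [y]) cur = firstRE zs cur := by
  induction zs with
  | nil => simp [firstRE, h]
  | cons z t ih => by_cases hz : z ∈ RE_LETTER <;> simp [firstRE, hz, ih]

theorem specU_append_re (zs : List String) (x : String) (cur : Option String)
    (h : x ∈ RE_LETTER) :
    specU (zs ++ [x]) cur = specU zs cur := by
  induction zs generalizing cur with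
  | nil => simp [specU, h]
  | cons z t ih => by_cases hz : z ∈ RE_LETTER <;> simp [specU, hz, ih]

theorem specU_append_not_re (zs : List String) (x : String) (cur : Option String)
    (h : x ∉ RE_LETTER) :
    specU (zs ++ [x]) cur = specU zs cur ++ [(x, firstRE zs.reverse cur)] := by
  induction zs generalizing cur with
  | nil => simp [specU, firstRE, h]
  | cons z t ih =>
    by_cases hz : z ∈ RE_LETTER
    · simp [specU, hz, ih, firstRE_append_re _ _ _ hz]
    · simp [specU, hz, ih, firstRE_append_not_re _ _ _ hz]

theorem specU_reverse (p : List String) (cur : Option String) :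
    (specU p.reverse cur).reverse = specT p cur := by
  induction p generalizing cur with
  | nil => simp [specU, specT]
  | cons x p' ih =>
    by_cases hre : x ∈ RE_LETTER
    · simp [specT, hre, specU_append_re _ _ _ hre, ih]
    · simp [specT, hre, specU_append_not_re _ _ _ (by simpa using hre), ih]

theorem expr1AltGo_acc (xs buf : List String) (res : List (String × Option String)) :
    expr1AltGo xs buf res = (expr1AltGo xs buf []).map (res ++ ·) := by
  induction xs generalizing buf res with
  | nil => simp [expr1AltGo]
  | cons x rest ih =>
    simp only [expr1AltGo]
    by_cases hl : LANG_LETTER.contains x = true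
    · rw [if_pos hl, if_pos hl, ih (buf ++ [x]) res]
    · by_cases hre : RE_LETTER.contains x = true
      · rw [if_neg hl, if_neg hl, if_pos hre, if_pos hre,
          ih [] (res ++ List.map (fun l => (l, some x)) buf),
          ih [] ([] ++ List.map (fun l => (l, some x)) buf)]
        cases expr1AltGo rest [] [] <;> simp
      · rw [if_neg hl, if_neg hl, if_neg hre, if_neg hre]
        simp

theorem expr1AltGo_eq_specT (xs : List String)
    (hv : ∀ l ∈ xs, l ∈ LANG_LETTER ∨ l ∈ RE_LETTER)
    (buf : List String) :
    expr1AltGo xs buf [] =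
      some (buf.map (fun l => (l, firstRE xs none)) ++ specT xs none) := by
  induction xs generalizing buf with
  | nil => simp [expr1AltGo, firstRE, specT]
  | cons x rest ih =>
    have hx := hv x (by simp)
    have hv' : ∀ l ∈ rest, l ∈ LANG_LETTER ∨ l ∈ RE_LETTER :=
      fun l hl => hv l (by simp [hl])
    by_cases hl : x ∈ LANG_LETTER
    · have hre := lang_not_re x hl
      simp [expr1AltGo, specT, firstRE, hl, hre, ih hv']
    · have hre : x ∈ RE_LETTER := by tauto
      have hlc : LANG_LETTER.contains x = false := by simpa using hl
      have hrec : RE_LETTER.contains x = true := by simpa using hre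
      simp only [expr1AltGo, specT, firstRE, hlc, hrec, Bool.false_eq_true,
        if_false, if_true]
      rw [expr1AltGo_acc, ih hv' []]
      simp

theorem valid_letters (s : String) (hp : Pre_expr1 s) :
    ∀ l ∈ s.toList.map (fun c => String.mk [c]),
      l ∈ LANG_LETTER ∨ l ∈ RE_LETTER := by
  intro l hl
  simp only [List.mem_map] at hl
  obtain ⟨c, hc, rfl⟩ := hl
  have := List.all_eq_true.mp hp c hc
  simp only [List.contains_eq_mem, List.mem_cons, List.not_mem_nil, or_false,
    decide_eq_true_eq] at this
  rcases this with h | h | h | h | h | h <;> subst h <;> decide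

-- ===== VERDICT (by name: the statement is the Claim_ definition above) =====
theorem expr1_spec : Claim_equal_expr1 := by
  intro s _ hp
  unfold Spec_expr1 expr1 expr1_alt
  have hv := valid_letters s hp
  set letters := s.toList.map (fun c => String.mk [c]) with hlet
  have hvr : ∀ l ∈ letters.reverse,
      l ∈ LANG_LETTER ∨ l ∈ RE_LETTER := by
    intro l hl; exact hv l (List.mem_reverse.mp hl)
  show ((expr1Go letters.reverse none none []).getD []).reverse =
      (expr1AltGo letters [] []).getD []
  rw [expr1Go_eq_specU letters.reverse hvr none none,
      expr1AltGo_eq_specT letters hv []]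
  simp [specU_reverse]
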